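-- pv_equiv track=rewrite | github.com/stnlywng/Poker-ML-Data-Preprocessor | parsing/round_parser.py | split_by_round
-- ===== SOURCE A (Python) =====
-- def split_by_round(content):
--     lines = content.splitlines()
--
--     round_data = []
--     current_round = []
--
--     for line in lines:
--         if "Poker Hand" in line:  # Replace with your round identifier
--             if current_round:
--                 round_data.append("\n".join(current_round))
--                 current_round = []
--         current_round.append(line)
--
--     if current_round:
--         round_data.append("\n".join(current_round))
--     return round_data
-- ===== SOURCE B (Python) =====
-- def split_by_round(content):
--     # Two-phase: collect marker line indices first, then cut the line list at
--     # those boundaries with slices and join each chunk.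
--     lines = content.splitlines()
--     if not lines:
--         return []
--     starts = [0] + [i for i, line in enumerate(lines) if i > 0 and "Poker Hand" in line]
--     bounds = starts + [len(lines)]
--     return ["\n".join(lines[a:b]) for a, b in zip(bounds, bounds[1:])]
-- ===== Notes on version B (the rewrite author's own statement) =====
-- stated objective: alternative
-- what changed: Replaces A's single-pass accumulator (buffer the current round's lines, flush-and-join at each marker and once after the loop) by a staged index-and-slice algorithm: one comprehension collects the indices of marker lines, the chunk boundaries are 0 plus those indices plus len(lines), and each round is produced by slicing lines between consecutive boundaries and joining the slice.
import Mathlib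
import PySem

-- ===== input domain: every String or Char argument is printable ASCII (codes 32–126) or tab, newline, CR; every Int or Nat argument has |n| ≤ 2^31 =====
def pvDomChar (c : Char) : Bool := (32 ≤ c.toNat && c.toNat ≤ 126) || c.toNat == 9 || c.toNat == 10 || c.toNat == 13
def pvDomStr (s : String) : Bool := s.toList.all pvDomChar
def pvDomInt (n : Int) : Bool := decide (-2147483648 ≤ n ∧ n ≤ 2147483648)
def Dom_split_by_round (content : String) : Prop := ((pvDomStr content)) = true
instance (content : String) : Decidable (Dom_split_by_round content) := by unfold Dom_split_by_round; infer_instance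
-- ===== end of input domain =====

-- B replaces A's buffer-and-flush single pass by a staged algorithm: collect
-- marker-line indices, form the boundary list 0 :: indices ++ [len], then slice
-- and join each consecutive pair of boundaries; alternative decomposition, same cost.


-- ===== PORT A =====
def split_by_round (content : String) : List String :=
  let lines := PySem.Str.splitlines content
  let st := lines.foldl
    (fun (st : List String × List String) line =>
      let st1 :=
        if PySem.Str.isIn "Poker Hand" line = true then
          if st.2 ≠ [] then (st.1 ++ [PySem.Str.join "\n" st.2], ([] : List String)) else st
        else st
      (st1.1, st1.2 ++ [line]))
    ([], [])
  if st.2 ≠ [] then st.1 ++ [PySem.Str.join "\n" st.2] else st.1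

-- ===== PORT B =====
def split_by_round_alt (content : String) : List String :=
  let lines := PySem.Str.splitlines content
  if lines = [] then []
  else
    let starts := (0 : Int) ::
      ((PySem.List.enumerate lines 0).filter
        (fun p => decide (0 < p.1) && PySem.Str.isIn "Poker Hand" p.2)).map (fun p => p.1)
    let bounds := starts ++ [(lines.length : Int)]
    (bounds.zip bounds.tail).map
      (fun ab => PySem.Str.join "\n" (PySem.List.slice lines (some ab.1) (some ab.2)))

-- ===== PRECONDITION & SPEC =====
def Spec_split_by_round (content : String) (out : List String) : Prop := out = split_by_round_alt content
instance (content : String) (out : List String) : Decidable (Spec_split_by_round content out) := by unfold Spec_split_by_round; infer_instance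

-- ===== CLAIM (what is proved, stated in full; the proofs are below) =====
def Claim_equal_split_by_round : Prop := ∀ (content : String), Dom_split_by_round content → Spec_split_by_round content (split_by_round content)

-- ===== LEMMAS AND PROOFS =====

-- Named copy of A's fold step (definitionally A's lambda) and its final flush.
def pvStepA (st : List String × List String) (line : String) : List String × List String :=
  let st1 :=
    if PySem.Str.isIn "Poker Hand" line = true then
      if st.2 ≠ [] then (st.1 ++ [PySem.Str.join "\n" st.2], ([] : List String)) else st
    else st
  (st1.1, st1.2 ++ [line])

def pvFlush (st : List String × List String) : List String :=
  if st.2 ≠ [] then st.1 ++ [PySem.Str.join "\n" st.2] else st.1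

lemma pvStepA_eq (done cur : List String) (l : String) :
    pvStepA (done, cur) l
      = if PySem.Str.isIn "Poker Hand" l = true ∧ cur ≠ [] then
          (done ++ [PySem.Str.join "\n" cur], [l])
        else (done, cur ++ [l]) := by
  unfold pvStepA
  split_ifs <;> simp_all

-- The common intermediate: the round chunks (as line lists), given the currently
-- open chunk `cur` and the remaining lines.
def pvChunks (cur : List String) : List String → List (List String)
  | [] => [cur]
  | l :: ls =>
      if PySem.Str.isIn "Poker Hand" l = true then cur :: pvChunks [l] ls
      else pvChunks (cur ++ [l]) ls

-- A's flushed fold, started with an open chunk `cur`, emits `done ++` the joined chunks.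
lemma pvA_fold (ls : List String) : ∀ (done cur : List String), cur ≠ [] →
    pvFlush (ls.foldl pvStepA (done, cur))
      = done ++ (pvChunks cur ls).map (PySem.Str.join "\n") := by
  induction ls with
  | nil => intro done cur h; simp [pvFlush, pvChunks, h]
  | cons l ls ih =>
    intro done cur h
    rw [List.foldl_cons, pvStepA_eq]
    by_cases hm : PySem.Str.isIn "Poker Hand" l = true
    · have hm2 : PySem.Chars.isIn ['P','o','k','e','r',' ','H','a','n','d'] l.toList = true := by simpa using hm
      rw [if_pos ⟨hm, h⟩]
      simpa [pvChunks, hm2] using ih (done ++ [PySem.Str.join "\n" cur]) [l] (by simp)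
    · have hm2 : PySem.Chars.isIn ['P','o','k','e','r',' ','H','a','n','d'] l.toList = false := by simpa using hm
      rw [if_neg (by simp [hm2])]
      simpa [pvChunks, hm2] using ih done (cur ++ [l]) (by simp)
def pvMarks : List String → List Int
  | [] => []
  | l :: ls =>
      (if PySem.Str.isIn "Poker Hand" l = true then [(0 : Int)] else [])
        ++ (pvMarks ls).map (· + 1)

lemma pvMarks_enum (xs : List String) : ∀ (s : Int),
    ((PySem.List.enumerate xs s).filter
        (fun p => PySem.Str.isIn "Poker Hand" p.2)).map (fun p => p.1)
      = (pvMarks xs).map (· + s) := by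
  induction xs with
  | nil => intro s; simp [pvMarks, PySem.List.enumerate_nil]
  | cons x xs ih =>
    intro s
    have hshift : ((pvMarks xs).map (· + (1:Int))).map (· + s) = (pvMarks xs).map (· + (s+1)) := by
      rw [List.map_map]; congr 1; funext i; simp; ring
    rw [PySem.List.enumerate_cons, List.filter_cons]
    by_cases hm : PySem.Str.isIn "Poker Hand" x = true
    · rw [if_pos (show (fun (p : Int × String) => PySem.Str.isIn "Poker Hand" p.2) (s, x) = true from hm)]
      rw [List.map_cons, ih (s+1)]
      simp only [pvMarks, hm, if_true, List.singleton_append, List.map_cons]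
      rw [← hshift]
      simp
    · have hm' := eq_false_of_ne_true hm
      rw [if_neg (show ¬((fun (p : Int × String) => PySem.Str.isIn "Poker Hand" p.2) (s, x) = true) from hm)]
      rw [ih (s+1)]
      simp only [pvMarks, hm', Bool.false_eq_true, if_false, List.nil_append]
      rw [← hshift]

lemma pvStarts_eq (l : String) (ls : List String) :
    ((PySem.List.enumerate (l :: ls) 0).filter
        (fun p => decide (0 < p.1) && PySem.Str.isIn "Poker Hand" p.2)).map (fun p => p.1)
      = (pvMarks ls).map (· + 1) := by
  rw [PySem.List.enumerate_cons]
  have hcong : (PySem.List.enumerate ls (0 + 1)).filter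
        (fun p => decide (0 < p.1) && PySem.Str.isIn "Poker Hand" p.2)
      = (PySem.List.enumerate ls (0 + 1)).filter
        (fun p => PySem.Str.isIn "Poker Hand" p.2) := by
    apply List.filter_congr
    intro p hp
    rcases (PySem.List.mem_enumerate_iff ls (0+1) p).1 hp with ⟨k, hk, rfl⟩
    simp
    omega
  rw [List.filter_cons, if_neg (by simp)]
  rw [hcong, pvMarks_enum ls (0 + 1)]
  norm_num

lemma pvSlice_mid (outer pre rest : List String) :
    PySem.List.slice (outer ++ pre ++ rest) (some (outer.length : Int))
      (some ((outer.length : Int) + (pre.length : Int))) = pre := by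
  rw [PySem.List.slice_natCast_add]
  simp [List.append_assoc]

def pvCuts (full : List String) (bs : List Int) : List (List String) :=
  (bs.zip bs.tail).map (fun ab => PySem.List.slice full (some ab.1) (some ab.2))

lemma pvCuts_cons (full : List String) (a b : Int) (r : List Int) :
    pvCuts full (a :: b :: r)
      = PySem.List.slice full (some a) (some b) :: pvCuts full (b :: r) := by
  simp [pvCuts]

lemma pvL (ls : List String) : ∀ (outer pre : List String),
    pvCuts (outer ++ pre ++ ls)
      (((outer.length : Int)) ::
        ((pvMarks ls).map (fun i => i + ((outer.length : Int) + (pre.length : Int)))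
          ++ [(outer.length : Int) + (pre.length : Int) + (ls.length : Int)]))
    = pvChunks pre ls := by
  induction ls with
  | nil =>
    intro outer pre
    simp only [pvMarks, List.map_nil, List.nil_append, List.length_nil, Nat.cast_zero, add_zero]
    rw [show pvCuts (outer ++ pre ++ []) [(outer.length : Int), (outer.length : Int) + (pre.length : Int)]
        = [PySem.List.slice (outer ++ pre ++ []) (some (outer.length : Int)) (some ((outer.length : Int) + (pre.length : Int)))] by simp [pvCuts]]
    rw [pvSlice_mid]
    simp [pvChunks]
  | cons x xs ih =>
    intro outer pre
    by_cases hm : PySem.Str.isIn "Poker Hand" x = true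
    · have h1 := ih (outer ++ pre) [x]
      have harr : (fun (i : Int) => i + (((outer ++ pre).length : Int) + (([x] : List String).length : Int)))
          = fun (i : Int) => i + ((outer.length : Int) + (pre.length : Int) + 1) := by
        funext i; simp [List.length_append]; try ring
      rw [harr] at h1
      have hfull : (outer ++ pre) ++ [x] ++ xs = outer ++ pre ++ (x :: xs) := by
        simp [List.append_assoc]
      rw [hfull] at h1
      have hshift : (pvMarks (x :: xs)).map (fun i => i + ((outer.length : Int) + (pre.length : Int)))
          = ((outer.length : Int) + (pre.length : Int))
            :: (pvMarks xs).map (fun i => i + ((outer.length : Int) + (pre.length : Int) + 1)) := by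
        simp only [pvMarks, hm, if_true, List.singleton_append, List.map_cons, List.map_map]
        congr 1
        · ring
        · congr 1; funext i; simp; ring
      rw [hshift]
      rw [List.cons_append, pvCuts_cons, pvSlice_mid]
      rw [show pvChunks pre (x :: xs) = pre :: pvChunks [x] xs by
        simp only [pvChunks]; rw [if_pos hm]]
      congr 1
      rw [← h1]
      congr 2
      · simp [List.length_append]
      · simp [List.length_append]; try ring
    · have hm' := eq_false_of_ne_true hm
      have h1 := ih outer (pre ++ [x])
      have harr : (fun (i : Int) => i + ((outer.length : Int) + ((pre ++ [x] : List String).length : Int)))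
          = fun (i : Int) => i + ((outer.length : Int) + (pre.length : Int) + 1) := by
        funext i; simp [List.length_append]; try ring
      rw [harr] at h1
      have hfull : outer ++ (pre ++ [x]) ++ xs = outer ++ pre ++ (x :: xs) := by
        simp [List.append_assoc]
      rw [hfull] at h1
      have hshift : (pvMarks (x :: xs)).map (fun i => i + ((outer.length : Int) + (pre.length : Int)))
          = (pvMarks xs).map (fun i => i + ((outer.length : Int) + (pre.length : Int) + 1)) := by
        simp only [pvMarks, hm', Bool.false_eq_true, if_false, List.nil_append, List.map_map]
        congr 1; funext i; simp; ring
      rw [hshift]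
      rw [show pvChunks pre (x :: xs) = pvChunks (pre ++ [x]) xs by
        simp only [pvChunks]; rw [if_neg hm]]
      rw [← h1]
      congr 3
      · simp [List.length_append]; try ring


lemma pvCuts_map_join (full : List String) (bs : List Int) :
    (pvCuts full bs).map (PySem.Str.join "\n")
      = (bs.zip bs.tail).map
          (fun ab => PySem.Str.join "\n" (PySem.List.slice full (some ab.1) (some ab.2))) := by
  simp [pvCuts, List.map_map, Function.comp]

-- ===== VERDICT (by name: the statement is the Claim_ definition above) =====
theorem split_by_round_spec : Claim_equal_split_by_round := by
  intro content _
  show pvFlush ((PySem.Str.splitlines content).foldl pvStepA ([], []))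
      = split_by_round_alt content
  unfold split_by_round_alt
  cases hsp : PySem.Str.splitlines content with
  | nil => simp [pvFlush]
  | cons l ls =>
    rw [List.foldl_cons]
    have hA1 : pvStepA ([], []) l = (([] : List String), [l]) := by simp [pvStepA]
    rw [hA1, pvA_fold ls [] [l] (by simp), List.nil_append]
    rw [if_neg (by simp)]
    rw [pvStarts_eq l ls]
    have h := pvL ls [] [l]
    simp only [List.length_nil, List.length_cons, Nat.cast_zero,
      Nat.cast_one, zero_add, List.nil_append, List.singleton_append] at h
    have hlen : (((l :: ls).length : Nat) : Int) = 1 + (ls.length : Int) := by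
      simp [List.length_cons]; ring
    rw [← pvCuts_map_join, ← h]
    congr 2
    rw [hlen]
    simp
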